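-- pv_equiv track=rewrite | github.com/ii200400/algorithm | programmers_python/해시(딕셔너리)/위장.py | solution
-- ===== SOURCE A (Python) =====
-- def solution(clothes):
--     dic = {}
--     for i in clothes:
--         if dic.get(i[1]) == None: dic[i[1]] = [i[0]]
--         else: dic[i[1]].append(i[0])
--
--     count = 1
--     for i in dic.values():
--         count *= len(i)+1
--
--     return count-1
-- ===== SOURCE B (Python) =====
-- def solution(clothes):
--     # Recursive partition over the category list: take the first category,
--     # multiply in (its count + 1), and recurse on the remaining categories.
--     def prod(cats):
--         if not cats:
--             return 1
--         c = cats[0]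
--         rest = [x for x in cats if x != c]
--         return (cats.count(c) + 1) * prod(rest)
--     return prod([cat for _, cat in clothes]) - 1
-- ===== Notes on version B (the rewrite author's own statement) =====
-- stated objective: alternative
-- what changed: B drops A's hash-grouping dict entirely: it recurses on the category list, counting and filtering out one category per step and multiplying (count+1) factors directly.
import Mathlib
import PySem

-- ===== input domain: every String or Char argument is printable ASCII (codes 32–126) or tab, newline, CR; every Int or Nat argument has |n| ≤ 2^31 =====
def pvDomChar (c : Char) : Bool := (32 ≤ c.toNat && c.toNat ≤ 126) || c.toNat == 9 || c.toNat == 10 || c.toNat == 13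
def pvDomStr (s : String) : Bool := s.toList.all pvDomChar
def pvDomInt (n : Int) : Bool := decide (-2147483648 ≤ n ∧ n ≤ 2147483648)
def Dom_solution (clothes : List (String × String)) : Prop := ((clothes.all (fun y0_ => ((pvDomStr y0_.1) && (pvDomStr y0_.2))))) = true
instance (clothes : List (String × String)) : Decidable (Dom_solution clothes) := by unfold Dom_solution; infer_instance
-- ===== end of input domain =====

-- B replaces A's dict-grouping with a recursive count-and-filter partition over the category list (alternative decomposition, similar cost); A = B on all inputs.


-- ===== PORT A =====
-- dic = {}; for i in clothes: if dic.get(i[1]) == None: dic[i[1]] = [i[0]] else: dic[i[1]].append(i[0])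
def solutionDic (clothes : List (String × String)) : PySem.Dict String (List String) :=
  clothes.foldl
    (fun d i =>
      if d.get? i.2 = none then d.insert i.2 [i.1]
      else d.modify i.2 [] (fun l => l ++ [i.1]))
    PySem.Dict.empty

def solution (clothes : List (String × String)) : Int :=
  -- count = 1; for i in dic.values(): count *= len(i)+1
  let count : Int := (solutionDic clothes).values.foldl (fun count i => count * ((i.length : Int) + 1)) 1
  count - 1

-- ===== PORT B =====
-- def prod(cats): if not cats: return 1; c = cats[0]; rest = [x for x in cats if x != c]; return (cats.count(c)+1)*prod(rest)
def prodCats : List String → Int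
  | [] => 1
  | c :: t =>
      (((c :: t).count c : Int) + 1) * prodCats ((c :: t).filter (fun x => x != c))
termination_by l => l.length
decreasing_by
  simp only [List.filter, bne_self_eq_false]
  exact Nat.lt_succ_of_le (List.length_filter_le _ _)

def solution_alt (clothes : List (String × String)) : Int :=
  prodCats (clothes.map (fun p => p.2)) - 1

-- ===== PRECONDITION & SPEC =====
def Spec_solution (clothes : List (String × String)) (out : Int) : Prop := out = solution_alt clothes
instance (clothes : List (String × String)) (out : Int) : Decidable (Spec_solution clothes out) := by unfold Spec_solution; infer_instance

-- ===== CLAIM (what is proved, stated in full; the proofs are below) =====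
def Claim_equal_solution : Prop := ∀ (clothes : List (String × String)), Dom_solution clothes → Spec_solution clothes (solution clothes)

-- ===== LEMMAS AND PROOFS =====

-- the common closed form: product of (count c + 1) over the distinct categories
def catProd (cats : List String) : Int :=
  ∏ c ∈ cats.toFinset, ((cats.count c : Int) + 1)

-- A's loop body is exactly a 'modify' on every input (the two branches agree with modify's definition)
lemma stepA_eq_modify (d : PySem.Dict String (List String)) (i : String × String) :
    (if d.get? i.2 = none then d.insert i.2 [i.1]
     else d.modify i.2 [] (fun l => l ++ [i.1]))
    = d.modify i.2 [] (fun l => l ++ [i.1]) := by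
  split
  · next h =>
    simp [PySem.Dict.modify, PySem.Dict.getD_eq_get?_getD, h]
  · rfl

lemma prodCats_eq_catProd (cats : List String) : prodCats cats = catProd cats := by
  induction cats using prodCats.induct with
  | case1 => simp [prodCats, catProd]
  | case2 c t ih =>
    rw [prodCats, ih]
    have hmemc : c ∈ (c :: t).toFinset := by simp
    have hfin : ((c :: t).filter (fun x => x != c)).toFinset = (c :: t).toFinset.erase c := by
      ext x
      simp [List.mem_toFinset, Finset.mem_erase, bne_iff_ne, and_comm]
    unfold catProd
    rw [← Finset.mul_prod_erase _ _ hmemc, hfin]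
    congr 1
    apply Finset.prod_congr rfl
    intro x hx
    have hxc : x ≠ c := (Finset.mem_erase.mp hx).1
    rw [List.count_filter]
    simp [hxc]

lemma foldl_mul_map (l : List (List String)) (a : Int) :
    l.foldl (fun count i => count * ((i.length : Int) + 1)) a
      = a * (l.map (fun i => ((i.length : Int) + 1))).prod := by
  induction l generalizing a with
  | nil => simp
  | cons x t ih => simp [ih, mul_assoc]

lemma solution_eq_catProd (clothes : List (String × String)) :
    solution clothes = catProd (clothes.map (fun p => p.2)) - 1 := by
  unfold solution solutionDic
  dsimp only
  have hfold :
      clothes.foldl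
        (fun d i =>
          if d.get? i.2 = none then d.insert i.2 [i.1]
          else d.modify i.2 [] (fun l => l ++ [i.1]))
        (PySem.Dict.empty : PySem.Dict String (List String))
      = clothes.foldl (fun d i => d.modify i.2 [] (fun l => l ++ [i.1])) PySem.Dict.empty :=
    by apply PySem.List.foldl_congr_mem; intro d i _; exact stepA_eq_modify d i
  rw [hfold]
  set cats := clothes.map (fun p => p.2) with hcats
  set d := clothes.foldl (fun d i => d.modify i.2 [] (fun l => l ++ [i.1]))
    (PySem.Dict.empty : PySem.Dict String (List String)) with hd
  have hnodup : d.keys.Nodup := by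
    rw [hd]
    exact PySem.Dict.nodup_keys_foldl_modify_key clothes (fun p => p.2) []
      (fun _ i l => l ++ [i.1]) _ (by simp [PySem.Dict.keys_empty])
  have hkeys : d.keys = PySem.Set.ofList cats := by
    rw [hd]
    rw [PySem.Dict.keys_foldl_modify_key clothes (fun p => p.2) [] (fun _ i l => l ++ [i.1])]
    simp [PySem.Dict.keys_empty, PySem.Set.ofList, PySem.Set.update, hcats]
  have hget : ∀ c, d.getD c [] = ((clothes.filter (fun p => p.2 == c)).map (fun p => p.1)) := by
    intro c
    have h := PySem.Dict.getD_foldl_modify_append (clothes.map (fun p => (p.2, p.1)))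
      (PySem.Dict.empty : PySem.Dict String (List String)) c
    rw [List.foldl_map] at h
    simp only [List.filter_map, List.map_map, PySem.Dict.getD_empty, List.nil_append,
      Function.comp_def] at h ⊢
    rw [hd]
    exact h
  rw [PySem.Dict.values_eq_map_keys d hnodup []]
  rw [foldl_mul_map, one_mul]
  congr 1
  rw [List.map_map, hkeys]
  have hlen : ∀ c, ((d.getD c []).length : Int) + 1 = (cats.count c : Int) + 1 := by
    intro c
    rw [hget c]
    have hc : (List.filter (fun p => p.2 == c) clothes).length
        = List.count c (clothes.map (fun p => p.2)) := by
      rw [List.count_eq_countP, List.countP_map, ← List.countP_eq_length_filter]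
      apply List.countP_congr
      intro p _
      exact Iff.rfl
    simp only [List.length_map, hcats, hc]
  calc ((PySem.Set.ofList cats).map ((fun i : List String => ((i.length : Int) + 1)) ∘ fun k => d.getD k [])).prod
      = ((PySem.Set.ofList cats).map (fun c => ((cats.count c : Int) + 1))).prod := by
        apply congrArg
        apply List.map_congr_left
        intro c _
        simp only [Function.comp]
        exact hlen c
    _ = catProd cats := by
        rw [catProd]
        have hfs : (PySem.Set.ofList cats).toFinset = cats.toFinset := by
          ext x; simp [PySem.Set.mem_ofList]
        rw [← hfs]
        exact (List.prod_toFinset _ (PySem.Set.nodup_ofList cats)).symm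

-- ===== VERDICT (by name: the statement is the Claim_ definition above) =====
theorem solution_spec : Claim_equal_solution := by
  intro clothes _
  unfold Spec_solution solution_alt
  rw [solution_eq_catProd, prodCats_eq_catProd]
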